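-- pv_equiv track=rewrite | github.com/taowen/torch2vk | src/torch2vk/vulkan/types.py | contiguous_strides
-- ===== SOURCE A (Python) =====
-- def contiguous_strides(shape: tuple[int, ...]) -> tuple[int, ...]:
--     if not shape:
--         return ()
--     strides = [1] * len(shape)
--     running = 1
--     for axis in range(len(shape) - 1, -1, -1):
--         strides[axis] = running
--         running *= int(shape[axis])
--     return tuple(strides)
-- ===== SOURCE B (Python) =====
-- def _prod(dims):
--     p = 1
--     for d in dims:
--         p *= int(d)
--     return p
--
--
-- def contiguous_strides(shape: tuple[int, ...]) -> tuple[int, ...]: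
--     return tuple(_prod(shape[i + 1:]) for i in range(len(shape)))
-- ===== Notes on version B (the rewrite author's own statement) =====
-- stated objective: alternative
-- what changed: Computes each stride independently as the product of all later dimensions (per-axis suffix-slice products), replacing A's single reverse pass with a maintained running accumulator; trades O(n) for O(n^2) in exchange for a stateless per-axis formula.
import Mathlib
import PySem

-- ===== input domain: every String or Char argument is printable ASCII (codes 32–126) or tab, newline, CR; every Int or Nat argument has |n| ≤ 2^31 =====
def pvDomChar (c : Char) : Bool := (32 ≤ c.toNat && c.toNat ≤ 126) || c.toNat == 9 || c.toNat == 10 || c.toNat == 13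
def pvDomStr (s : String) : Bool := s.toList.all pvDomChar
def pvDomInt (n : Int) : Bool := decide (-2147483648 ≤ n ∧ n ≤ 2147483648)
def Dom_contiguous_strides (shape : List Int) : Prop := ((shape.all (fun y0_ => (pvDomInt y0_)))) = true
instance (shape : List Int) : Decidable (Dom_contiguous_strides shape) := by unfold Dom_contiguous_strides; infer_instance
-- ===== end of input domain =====

-- B computes each stride independently as the product of the suffix slice shape[i+1:]
-- (stateless per-axis formula) instead of A's reverse pass with a running accumulator;
-- same results, O(n^2) instead of O(n).

-- ===== PORT A =====
def contiguous_strides (shape : List Int) : List Int :=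
  if shape = [] then []
  else
    -- strides = [1] * len(shape); running = 1; for axis in range(len-1, -1, -1): …
    ((PySem.List.pyRange ((shape.length : Int) - 1) (-1) (-1)).foldl
      (fun (st : List Int × Int) axis =>
        (PySem.List.pySetD st.1 axis st.2, st.2 * PySem.List.pyGetD shape axis 0))
      (List.replicate shape.length 1, 1)).1

-- ===== PORT B =====
-- _prod: p = 1; for d in dims: p *= int(d); return p
def pvProdB (dims : List Int) : Int := dims.foldl (fun p d => p * d) 1

-- tuple(_prod(shape[i+1:]) for i in range(len(shape)))
def contiguous_strides_alt (shape : List Int) : List Int :=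
  (List.range shape.length).map
    (fun (i : Nat) => pvProdB (PySem.List.slice shape (some ((i : Int) + 1)) none))

-- ===== PRECONDITION & SPEC =====
def Spec_contiguous_strides (shape : List Int) (out : List Int) : Prop := out = contiguous_strides_alt shape
instance (shape : List Int) (out : List Int) : Decidable (Spec_contiguous_strides shape out) := by unfold Spec_contiguous_strides; infer_instance

-- ===== CLAIM (what is proved, stated in full; the proofs are below) =====
def Claim_equal_contiguous_strides : Prop := ∀ (shape : List Int), Dom_contiguous_strides shape → Spec_contiguous_strides shape (contiguous_strides shape)

-- ===== LEMMAS AND PROOFS =====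

-- sp r l : the list whose i-th element is r * (product of l after index i)
def pvSp (r : Int) : List Int → List Int
  | [] => []
  | _ :: t => (r * t.prod) :: pvSp r t

theorem pvSp_append_singleton (r x : Int) (l : List Int) :
    pvSp r (l ++ [x]) = pvSp (r * x) l ++ [r] := by
  induction l with
  | nil => simp [pvSp]
  | cons y l ih => simp [pvSp, ih]; ring

theorem pvProdB_eq_prod (l : List Int) : pvProdB l = l.prod := by
  have h : ∀ (l : List Int) (a : Int), l.foldl (fun p d => p * d) a = a * l.prod := by
    intro l
    induction l with
    | nil => intro a; simp
    | cons d t ih => intro a; simp [ih]; ring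
  simpa [pvProdB] using h l 1

theorem alt_eq_pvSp (s : List Int) : contiguous_strides_alt s = pvSp 1 s := by
  unfold contiguous_strides_alt
  induction s with
  | nil => rfl
  | cons d t ih =>
    rw [List.length_cons, List.range_succ_eq_map, List.map_cons, List.map_map]
    have h1 : pvProdB (PySem.List.slice (d :: t) (some ((0 : Nat) + 1 : Int)) none)
        = 1 * t.prod := by
      have : ((0 : Nat) + 1 : Int) = ((1 : Nat) : Int) := by norm_num
      rw [this, PySem.List.slice_from_natCast]
      simp [pvProdB_eq_prod]
    have h2 : ∀ i : Nat,
        pvProdB (PySem.List.slice (d :: t) (some (((i + 1 : Nat) : Int) + 1)) none)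
        = pvProdB (PySem.List.slice t (some ((i : Int) + 1)) none) := by
      intro i
      have ha : (((i + 1 : Nat) : Int) + 1) = ((i + 2 : Nat) : Int) := by push_cast; ring
      have hb : ((i : Int) + 1) = ((i + 1 : Nat) : Int) := by push_cast; ring
      rw [ha, hb, PySem.List.slice_from_natCast, PySem.List.slice_from_natCast]
      rfl
    rw [pvSp, ← ih]
    refine congrArg₂ List.cons ?_ ?_
    · simpa using h1
    · exact List.map_congr_left (fun i _ => by simpa [Function.comp, Nat.succ_eq_add_one] using h2 i)

theorem loop_invariant (s : List Int) (k : Nat) (hk : k ≤ s.length) :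
    ∀ (st : List Int) (r : Int), st.length = s.length →
    ((PySem.List.pyRange ((k : Int) - 1) (-1) (-1)).foldl
      (fun (p : List Int × Int) axis =>
        (PySem.List.pySetD p.1 axis p.2, p.2 * PySem.List.pyGetD s axis 0)) (st, r)).1
      = pvSp r (s.take k) ++ st.drop k := by
  induction k with
  | zero =>
    intro st r hst
    rw [PySem.List.pyRange_neg_one_eq_nil (by norm_num)]
    simp [pvSp]
  | succ k ih =>
    intro st r hst
    have hk' : k < s.length := by omega
    have hcast : ((k + 1 : Nat) : Int) - 1 = (k : Int) := by push_cast; omega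
    rw [hcast, PySem.List.pyRange_neg_one_cons (by omega), List.foldl_cons]
    simp only [PySem.List.pySetD_natCast, PySem.List.pyGetD_natCast]
    rw [ih (by omega) (st.set k r) (r * s.getD k 0) (by simp [hst])]
    have hgetD : s.getD k 0 = s[k] := List.getD_eq_getElem s 0 hk'
    have hdrop : (st.set k r).drop k = r :: st.drop (k+1) := by
      rw [List.drop_eq_getElem_cons (by simpa [hst] using hk')]
      simp [List.drop_set]
    have htake : s.take (k+1) = s.take k ++ [s[k]] := by
      rw [List.take_add_one]; simp [List.getElem?_eq_getElem hk']
    rw [hdrop, htake, pvSp_append_singleton, hgetD]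
    simp

-- ===== VERDICT (by name: the statement is the Claim_ definition above) =====
theorem contiguous_strides_spec : Claim_equal_contiguous_strides := by
  intro shape _
  unfold Spec_contiguous_strides contiguous_strides
  by_cases h : shape = []
  · subst h; rfl
  · rw [if_neg h,
      loop_invariant shape shape.length le_rfl _ 1 (List.length_replicate),
      alt_eq_pvSp]
    simp
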